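-- pv_equiv track=rewrite | github.com/willianchu/datascience | question2.py | Questions_Marks
-- ===== SOURCE A (Python) =====
-- def remove_letters(string):
--   without_letters = ""
--   for char in string:
--     if char.isdigit() or char == "?":
--       without_letters += char
--   return without_letters
--
-- def Questions_Marks(strParam):
--   numbers_and_question_marks = remove_letters(strParam)
--   found = False
--   for i in range(0, len(numbers_and_question_marks) - 4):
--     if numbers_and_question_marks[i].isdigit() and numbers_and_question_marks[i+4].isdigit():
--       if numbers_and_question_marks[i+1] == "?" and numbers_and_question_marks[i+2] == "?" and numbers_and_question_marks[i+3] == "?" and (int(numbers_and_question_marks[i]) + int(numbers_and_question_marks[i+4])) == 10: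
--         found = True
--
--   return found
-- ===== SOURCE B (Python) =====
-- def Questions_Marks(strParam):
--     filtered = [c for c in strParam if c.isdigit() or c == "?"]
--     digits = [(i, c) for i, c in enumerate(filtered) if c.isdigit()]
--     return any(q - p == 4 and int(a) + int(b) == 10
--                for (p, a), (q, b) in zip(digits, digits[1:]))
-- ===== Notes on version B (the rewrite author's own statement) =====
-- stated objective: alternative
-- what changed: Instead of scanning every index of the filtered string with a 5-char window, B enumerates the digit positions once and tests only consecutive digit pairs (gap exactly 4 forces the three intervening filtered chars to be '?'); B also returns early on the first match where A keeps scanning.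
import Mathlib
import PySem

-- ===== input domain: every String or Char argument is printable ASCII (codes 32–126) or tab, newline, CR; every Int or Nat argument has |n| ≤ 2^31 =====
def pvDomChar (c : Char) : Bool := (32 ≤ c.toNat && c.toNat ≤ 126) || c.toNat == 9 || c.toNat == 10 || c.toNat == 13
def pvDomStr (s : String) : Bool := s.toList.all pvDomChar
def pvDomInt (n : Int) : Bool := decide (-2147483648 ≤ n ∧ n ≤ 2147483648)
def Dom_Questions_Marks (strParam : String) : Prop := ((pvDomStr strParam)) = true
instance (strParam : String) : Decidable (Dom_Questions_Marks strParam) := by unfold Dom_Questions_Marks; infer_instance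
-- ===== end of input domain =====

-- B replaces A's every-index 5-char window scan over the filtered string by one pass over the
-- digit positions, testing only consecutive digit pairs at gap 4 (alternative decomposition; same cost).

-- ===== PORT A =====
-- remove_letters: builds the digits-and-'?' string by repeated concatenation
def pvRemoveLetters (cs : List Char) : List Char :=
  cs.foldl (fun acc c => if PySem.Chars.isdigit c || c == '?' then acc ++ [c] else acc) []

-- indices produced by range(0, len-4) are always in range, so pyGetD's default is never read;
-- int(c) on a single digit char is PySem.Int.ofChars? [c], whose .getD 0 is never the default either
def Questions_Marks (strParam : String) : Bool :=
  let nq := pvRemoveLetters strParam.toList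
  (PySem.List.pyRange 0 ((nq.length : Int) - 4)).foldl
    (fun found i =>
      if PySem.Chars.isdigit (PySem.List.pyGetD nq i ' ')
          && PySem.Chars.isdigit (PySem.List.pyGetD nq (i + 4) ' ') then
        if (PySem.List.pyGetD nq (i + 1) ' ' == '?')
            && (PySem.List.pyGetD nq (i + 2) ' ' == '?')
            && (PySem.List.pyGetD nq (i + 3) ' ' == '?')
            && ((PySem.Int.ofChars? [PySem.List.pyGetD nq i ' ']).getD 0
                  + (PySem.Int.ofChars? [PySem.List.pyGetD nq (i + 4) ' ']).getD 0 == 10) then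
          true
        else found
      else found)
    false

-- ===== PORT B =====
def Questions_Marks_alt (strParam : String) : Bool :=
  let filtered := strParam.toList.filter (fun c => PySem.Chars.isdigit c || c == '?')
  let digits := (PySem.List.enumerate filtered).filter (fun ic => PySem.Chars.isdigit ic.2)
  (digits.zip (PySem.List.slice digits (some 1) none)).any
    (fun pq => (pq.2.1 - pq.1.1 == 4)
      && ((PySem.Int.ofChars? [pq.1.2]).getD 0 + (PySem.Int.ofChars? [pq.2.2]).getD 0 == 10))

-- ===== PRECONDITION & SPEC =====
def Spec_Questions_Marks (strParam : String) (out : Bool) : Prop := out = Questions_Marks_alt strParam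
instance (strParam : String) (out : Bool) : Decidable (Spec_Questions_Marks strParam out) := by unfold Spec_Questions_Marks; infer_instance

-- ===== CLAIM (what is proved, stated in full; the proofs are below) =====
def Claim_equal_Questions_Marks : Prop := ∀ (strParam : String), Dom_Questions_Marks strParam → Spec_Questions_Marks strParam (Questions_Marks strParam)

-- ===== LEMMAS AND PROOFS =====

-- 'a d???d window with digit sum 10 starts at index k of l'
def pvOk (l : List Char) (k : Nat) : Prop := ∃ a b,
  l[k]? = some a ∧ l[k + 1]? = some '?' ∧ l[k + 2]? = some '?' ∧ l[k + 3]? = some '?' ∧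
  l[k + 4]? = some b ∧ PySem.Chars.isdigit a = true ∧ PySem.Chars.isdigit b = true ∧
  (PySem.Int.ofChars? [a]).getD 0 + (PySem.Int.ofChars? [b]).getD 0 = 10

theorem pv_if_if (c₁ c₂ : Int → Bool) (l : List Int) (b : Bool) :
    l.foldl (fun found i => if c₁ i then (if c₂ i then true else found) else found) b
      = (b || l.any (fun i => c₁ i && c₂ i)) := by
  have h : (fun (found : Bool) (i : Int) => if c₁ i then (if c₂ i then true else found) else found)
      = fun found i => if c₁ i && c₂ i then true else found := by
    funext found i; cases h1 : c₁ i <;> cases h2 : c₂ i <;> simp [*]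
  rw [h, PySem.List.foldl_if_true_eq]

theorem pvGetD? (l : List Char) (j : Int) (h0 : 0 ≤ j) (h1 : j < (l.length : Int)) :
    l[j.toNat]? = some (PySem.List.pyGetD l j ' ') := by
  rw [PySem.List.pyGetD_eq_getElem l ' ' h0 h1, List.getElem?_eq_getElem]

theorem pvA_any (l : List Char) :
    ((PySem.List.pyRange 0 ((l.length : Int) - 4)).foldl
      (fun found i =>
        if PySem.Chars.isdigit (PySem.List.pyGetD l i ' ')
            && PySem.Chars.isdigit (PySem.List.pyGetD l (i + 4) ' ') then
          if (PySem.List.pyGetD l (i + 1) ' ' == '?')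
              && (PySem.List.pyGetD l (i + 2) ' ' == '?')
              && (PySem.List.pyGetD l (i + 3) ' ' == '?')
              && ((PySem.Int.ofChars? [PySem.List.pyGetD l i ' ']).getD 0
                    + (PySem.Int.ofChars? [PySem.List.pyGetD l (i + 4) ' ']).getD 0 == 10) then
            true
          else found
        else found)
      false = true) ↔ ∃ k, pvOk l k := by
  rw [pv_if_if]
  simp only [Bool.false_or, List.any_eq_true]
  constructor
  · rintro ⟨i, hmem, hC⟩
    rw [PySem.List.mem_pyRange_one] at hmem
    obtain ⟨h0, h4⟩ := hmem
    simp only [Bool.and_eq_true, beq_iff_eq] at hC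
    obtain ⟨⟨hda, hdb⟩, ⟨⟨⟨hq1, hq2⟩, hq3⟩, hsum⟩⟩ := hC
    refine ⟨i.toNat, PySem.List.pyGetD l i ' ', PySem.List.pyGetD l (i + 4) ' ',
      ?_, ?_, ?_, ?_, ?_, hda, hdb, hsum⟩
    · exact pvGetD? l i h0 (by omega)
    · rw [show i.toNat + 1 = (i + 1).toNat by omega, pvGetD? l (i+1) (by omega) (by omega), hq1]
    · rw [show i.toNat + 2 = (i + 2).toNat by omega, pvGetD? l (i+2) (by omega) (by omega), hq2]
    · rw [show i.toNat + 3 = (i + 3).toNat by omega, pvGetD? l (i+3) (by omega) (by omega), hq3]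
    · rw [show i.toNat + 4 = (i + 4).toNat by omega, pvGetD? l (i+4) (by omega) (by omega)]
  · rintro ⟨k, a, b, h0', h1', h2', h3', h4', hda, hdb, hsum⟩
    have hk4 : k + 4 < l.length := (List.getElem?_eq_some_iff.1 h4').1
    have e0 : PySem.List.pyGetD l (k : Int) ' ' = a := by
      have := pvGetD? l (k : Int) (by omega) (by omega)
      rw [show ((k : Int)).toNat = k by omega, h0'] at this
      exact (Option.some.inj this).symm
    have e1 : PySem.List.pyGetD l ((k : Int) + 1) ' ' = '?' := by
      have := pvGetD? l ((k : Int) + 1) (by omega) (by omega)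
      rw [show ((k : Int) + 1).toNat = k + 1 by omega, h1'] at this
      exact (Option.some.inj this).symm
    have e2 : PySem.List.pyGetD l ((k : Int) + 2) ' ' = '?' := by
      have := pvGetD? l ((k : Int) + 2) (by omega) (by omega)
      rw [show ((k : Int) + 2).toNat = k + 2 by omega, h2'] at this
      exact (Option.some.inj this).symm
    have e3 : PySem.List.pyGetD l ((k : Int) + 3) ' ' = '?' := by
      have := pvGetD? l ((k : Int) + 3) (by omega) (by omega)
      rw [show ((k : Int) + 3).toNat = k + 3 by omega, h3'] at this
      exact (Option.some.inj this).symm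
    have e4 : PySem.List.pyGetD l ((k : Int) + 4) ' ' = b := by
      have := pvGetD? l ((k : Int) + 4) (by omega) (by omega)
      rw [show ((k : Int) + 4).toNat = k + 4 by omega, h4'] at this
      exact (Option.some.inj this).symm
    refine ⟨(k : Int), PySem.List.mem_pyRange_one.2 ⟨by omega, by omega⟩, ?_⟩
    simp [e0, e1, e2, e3, e4, hda, hdb, hsum]

theorem pvOk_cons_succ (c : Char) (t : List Char) (k : Nat) : pvOk (c :: t) (k + 1) ↔ pvOk t k := by
  simp [pvOk, Nat.add_right_comm _ 1]

theorem pvOk_zero_not_digit {c : Char} {t : List Char} (h : PySem.Chars.isdigit c = false) :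
    ¬ pvOk (c :: t) 0 := by
  rintro ⟨a, b, ha, -, -, -, -, hda, -, -⟩
  simp at ha; subst ha; simp [h] at hda

theorem pvOk_exists_cons (c : Char) (t : List Char) :
    (∃ k, pvOk (c :: t) k) ↔ (pvOk (c :: t) 0 ∨ ∃ k, pvOk t k) := by
  constructor
  · rintro ⟨k, hk⟩
    cases k with
    | zero => exact Or.inl hk
    | succ k => exact Or.inr ⟨k, (pvOk_cons_succ c t k).1 hk⟩
  · rintro (h | ⟨k, hk⟩)
    · exact ⟨0, h⟩
    · exact ⟨k + 1, (pvOk_cons_succ c t k).2 hk⟩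

theorem pvHead_filter_enum (t : List Char) (s q : Int) (b : Char) :
    (((PySem.List.enumerate t s).filter (fun ic => PySem.Chars.isdigit ic.2)).head? = some (q, b)) ↔
      ∃ j : Nat, t[j]? = some b ∧ q = s + j ∧ PySem.Chars.isdigit b = true ∧
        ∀ m < j, ∀ x, t[m]? = some x → PySem.Chars.isdigit x = false := by
  induction t generalizing s q with
  | nil => simp [PySem.List.enumerate_nil]
  | cons c t ih =>
    rw [PySem.List.enumerate_cons, List.filter_cons]
    cases hd : PySem.Chars.isdigit c with
    | false =>
      simp only [Bool.false_eq_true, if_false]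
      rw [ih (s + 1) q]
      constructor
      · rintro ⟨j, hj, hq, hdb, hmin⟩
        refine ⟨j + 1, by simpa using hj, by push_cast; omega, hdb, ?_⟩
        intro m hm x hx
        cases m with
        | zero => simp at hx; subst hx; exact hd
        | succ m => exact hmin m (by omega) x (by simpa using hx)
      · rintro ⟨j, hj, hq, hdb, hmin⟩
        cases j with
        | zero =>
          simp at hj; subst hj; simp [hd] at hdb
        | succ j =>
          refine ⟨j, by simpa using hj, by push_cast at hq ⊢; omega, hdb, ?_⟩
          intro m hm x hx
          exact hmin (m + 1) (by omega) x (by simpa using hx)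
    | true =>
      simp only [if_true, List.head?_cons, Option.some.injEq, Prod.mk.injEq]
      constructor
      · rintro ⟨hq, hb⟩
        exact ⟨0, by simp [hb], by omega, by rw [← hb]; exact hd, by omega⟩
      · rintro ⟨j, hj, hq, hdb, hmin⟩
        cases j with
        | zero =>
          simp at hj hq; exact ⟨by omega, hj⟩
        | succ j =>
          exact absurd hd (by simpa using hmin 0 (by omega) c (by simp))


-- a digit somewhere in t means the digit-positions list of t is nonempty
theorem pvDigit_mem_filter_enum {t : List Char} {x : Char} (hx : x ∈ t)
    (hdx : PySem.Chars.isdigit x = true) (s : Int) :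
    (PySem.List.enumerate t s).filter (fun ic => PySem.Chars.isdigit ic.2) ≠ [] := by
  intro hnil
  have : x ∈ (PySem.List.enumerate t s).map (·.2) := by
    rw [PySem.List.map_snd_enumerate]; exact hx
  obtain ⟨p, hp, hp2⟩ := List.mem_map.1 this
  have := List.filter_eq_nil_iff.1 hnil p hp
  simp [hp2, hdx] at this

theorem pvB_iff (l : List Char) (s : Int)
    (hinv : ∀ c ∈ l, PySem.Chars.isdigit c = true ∨ c = '?') :
    ((((PySem.List.enumerate l s).filter (fun ic => PySem.Chars.isdigit ic.2)).zip
        ((PySem.List.enumerate l s).filter (fun ic => PySem.Chars.isdigit ic.2)).tail).any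
      (fun pq => (pq.2.1 - pq.1.1 == 4)
        && ((PySem.Int.ofChars? [pq.1.2]).getD 0 + (PySem.Int.ofChars? [pq.2.2]).getD 0 == 10)) = true)
      ↔ ∃ k, pvOk l k := by
  induction l generalizing s with
  | nil => simp [PySem.List.enumerate_nil, pvOk]
  | cons c t ih =>
    have hinvt : ∀ x ∈ t, PySem.Chars.isdigit x = true ∨ x = '?' :=
      fun x hx => hinv x (List.mem_cons_of_mem _ hx)
    rw [PySem.List.enumerate_cons, List.filter_cons]
    cases hd : PySem.Chars.isdigit c with
    | false =>
      simp only [Bool.false_eq_true, if_false]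
      rw [ih (s + 1) hinvt, pvOk_exists_cons]
      simp [pvOk_zero_not_digit hd]
    | true =>
      simp only [if_true]
      cases hds : (PySem.List.enumerate t (s + 1)).filter (fun ic => PySem.Chars.isdigit ic.2) with
      | nil =>
        simp only [List.tail_cons, List.zip_nil_right, List.any_nil,
          Bool.false_eq_true, false_iff, not_exists]
        have hnod : ∀ x ∈ t, PySem.Chars.isdigit x = false := by
          intro x hx
          by_contra h
          exact pvDigit_mem_filter_enum hx (by simpa using h) (s + 1) hds
        intro k hk
        simp only [pvOk] at hk
        obtain ⟨a, b, -, -, -, -, h4, -, hdb, -⟩ := hk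
        have hb : b ∈ t := by
          have : (c :: t)[k + 4]? = t[k + 3]? := by
            rw [show k + 4 = (k + 3) + 1 by omega, List.getElem?_cons_succ]
          rw [this] at h4
          exact List.mem_of_getElem? h4
        exact absurd hdb (by simp [hnod b hb])
      | cons qb rest =>
        obtain ⟨q, bb⟩ := qb
        have hhead := (pvHead_filter_enum t (s + 1) q bb).1 (by rw [hds]; rfl)
        obtain ⟨j, hj, hq, hdbb, hmin⟩ := hhead
        have hg : (((q - s == 4)
            && ((PySem.Int.ofChars? [c]).getD 0 + (PySem.Int.ofChars? [bb]).getD 0 == 10)) = true)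
            ↔ pvOk (c :: t) 0 := by
          constructor
          · intro hgt
            simp only [Bool.and_eq_true, beq_iff_eq] at hgt
            obtain ⟨hq4, hsum⟩ := hgt
            have hj3 : j = 3 := by omega
            subst hj3
            have hlen : 3 < t.length := (List.getElem?_eq_some_iff.1 hj).1
            have hqm : ∀ m < 3, t[m]? = some '?' := by
              intro m hm
              have hsome : ∃ y, t[m]? = some y := by
                rw [List.getElem?_eq_some_iff.2 ⟨by omega, rfl⟩]; exact ⟨_, rfl⟩
              obtain ⟨y, hy⟩ := hsome
              have hnd := hmin m hm y hy
              have := hinvt y (List.mem_of_getElem? hy)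
              rcases this with h | h
              · rw [hnd] at h; exact absurd h (by simp)
              · rw [hy, h]
            exact ⟨c, bb, by simp, by simpa using hqm 0 (by omega),
              by simpa using hqm 1 (by omega), by simpa using hqm 2 (by omega),
              by simpa using hj, hd, hdbb, hsum⟩
          · rintro ⟨a, b, ha, h1, h2, h3, h4, hda, hdb, hsum⟩
            have hac : c = a := by simpa using ha
            subst hac
            have h1' : t[0]? = some '?' := by simpa using h1
            have h2' : t[1]? = some '?' := by simpa using h2
            have h3' : t[2]? = some '?' := by simpa using h3
            have h4' : t[3]? = some b := by simpa using h4
            have hj3 : j = 3 := by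
              rcases Nat.lt_trichotomy j 3 with h | h | h
              · interval_cases j
                · rw [hj] at h1'; simp at h1'; subst h1'; exact absurd hdbb (by decide)
                · rw [hj] at h2'; simp at h2'; subst h2'; exact absurd hdbb (by decide)
                · rw [hj] at h3'; simp at h3'; subst h3'; exact absurd hdbb (by decide)
              · exact h
              · exact absurd (hmin 3 h b h4') (by simp [hdb])
            subst hj3
            have hbb : bb = b := by rw [hj] at h4'; simpa using h4'
            subst hbb
            simp only [Bool.and_eq_true, beq_iff_eq]
            exact ⟨by omega, hsum⟩
        have hih := ih (s + 1) hinvt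
        rw [hds] at hih
        simp only [List.tail_cons] at hih ⊢
        rw [List.zip_cons_cons, List.any_cons, Bool.or_eq_true, pvOk_exists_cons]
        exact or_congr (by simpa using hg) hih

-- ===== VERDICT (by name: the statement is the Claim_ definition above) =====
theorem Questions_Marks_spec : Claim_equal_Questions_Marks := by
  intro s _
  unfold Spec_Questions_Marks
  have hfil : pvRemoveLetters s.toList
      = s.toList.filter (fun c => PySem.Chars.isdigit c || c == '?') := by
    have h :=
      PySem.List.foldl_append_if_eq_filter (fun c => PySem.Chars.isdigit c || c == '?') s.toList []
    rw [List.nil_append] at h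
    exact h
  have hinv : ∀ c ∈ s.toList.filter (fun c => PySem.Chars.isdigit c || c == '?'),
      PySem.Chars.isdigit c = true ∨ c = '?' := by
    intro c hc
    have := (List.mem_filter.1 hc).2
    cases h : PySem.Chars.isdigit c with
    | true => exact Or.inl rfl
    | false => right; simpa [h] using this
  have hA : Questions_Marks s = true
      ↔ ∃ k, pvOk (s.toList.filter (fun c => PySem.Chars.isdigit c || c == '?')) k := by
    simp only [Questions_Marks, hfil]
    exact pvA_any _
  have hB : Questions_Marks_alt s = true
      ↔ ∃ k, pvOk (s.toList.filter (fun c => PySem.Chars.isdigit c || c == '?')) k := by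
    simp only [Questions_Marks_alt]
    rw [PySem.List.slice_from _ (by norm_num)]
    rw [show ((1 : Int)).toNat = 1 from rfl, List.drop_one]
    exact pvB_iff _ 0 hinv
  rw [Bool.eq_iff_iff, hA, hB]
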